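-- pv_equiv track=rewrite | github.com/morikouhei/programming_contest | atcoder/other/typical90/067.py | change10_9
-- ===== SOURCE A (Python) =====
-- def change10_9(x):
--     num = ""
--     now= x
--     while now:
--         now,m = divmod(now,9)
--         num += str(m)
--     if num == "":
--         num = "0"
--     return int(num[::-1])
-- ===== SOURCE B (Python) =====
-- def change10_9(x):
--     if x == 0:
--         return 0
--     return change10_9(x // 9) * 10 + x % 9
-- ===== Notes on version B (the rewrite author's own statement) =====
-- stated objective: simpler
-- what changed: Replaces the string-building loop (append str(digit), reverse the string, reparse with int) by a direct numeric recursion on the base-9 expansion that builds the decimal reading arithmetically, with no strings at all.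
import Mathlib
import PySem

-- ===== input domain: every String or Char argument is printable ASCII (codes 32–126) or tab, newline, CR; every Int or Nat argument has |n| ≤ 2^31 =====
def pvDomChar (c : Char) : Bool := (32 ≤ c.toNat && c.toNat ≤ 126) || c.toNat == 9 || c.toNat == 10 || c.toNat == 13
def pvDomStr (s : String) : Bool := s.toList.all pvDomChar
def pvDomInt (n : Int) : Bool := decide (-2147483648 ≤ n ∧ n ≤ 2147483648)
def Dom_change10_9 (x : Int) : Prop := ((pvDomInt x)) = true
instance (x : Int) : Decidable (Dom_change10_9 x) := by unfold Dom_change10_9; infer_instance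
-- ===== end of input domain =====

-- B replaces A's string building + reversal + int() reparse by a direct numeric
-- recursion on the base-9 expansion (objective: simpler).

-- ===== PORT A =====
-- the string num is modelled by its char list; num += str(m) appends PySem.Int.toChars m
-- the while loop, with fuel as a totality guard (for x < 0 the Python loop never terminates;
-- such x are excluded by Pre_; for 0 ≤ x the fuel x.toNat + 1 is never exhausted)
def pvALoop : Nat → Int → List Char → List Char
  | 0, _, num => num
  | f + 1, now, num =>
    if now = 0 then num
    else pvALoop f (PySem.Int.floordiv now 9) (num ++ PySem.Int.toChars (PySem.Int.mod now 9))

def pvDigitVal (c : Char) : Int := (c.toNat : Int) - 48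

-- int(s) ported by hand as a digit fold: exact for nonempty all-digit strings, which is
-- the only form num[::-1] takes for 0 ≤ x (PySem.Int.ofChars? agrees on such strings)
def pvParseDigits (cs : List Char) : Int := cs.foldl (fun acc c => acc * 10 + pvDigitVal c) 0

def change10_9 (x : Int) : Int :=
  let num := pvALoop (x.toNat + 1) x []
  let num := if num = [] then ['0'] else num
  pvParseDigits num.reverse

-- ===== PORT B =====
-- direct recursion of Source B, with fuel as a totality guard (never exhausted for 0 ≤ x;
-- for x < 0 the Python recursion overflows the stack, excluded by Pre_)
def pvBLoop : Nat → Int → Int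
  | 0, _ => 0
  | f + 1, x =>
    if x = 0 then 0
    else pvBLoop f (PySem.Int.floordiv x 9) * 10 + PySem.Int.mod x 9

def change10_9_alt (x : Int) : Int := pvBLoop (x.toNat + 1) x

-- ===== PRECONDITION & SPEC =====
-- Pre_ excludes x < 0: there A's while loop never terminates (divmod(now,9) floors, so a
-- negative now stays negative forever) and B's recursion never reaches its base case.
def Pre_change10_9 (x : Int) : Prop := 0 ≤ x
instance (x : Int) : Decidable (Pre_change10_9 x) := by unfold Pre_change10_9; infer_instance
def pvWitness_change10_9 : Int := (81)

def Spec_change10_9 (x : Int) (out : Int) : Prop := out = change10_9_alt x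
instance (x : Int) (out : Int) : Decidable (Spec_change10_9 x out) := by unfold Spec_change10_9; infer_instance

-- ===== CLAIM (what is proved, stated in full; the proofs are below) =====
def Claim_equal_change10_9 : Prop := ∀ (x : Int), Dom_change10_9 x → Pre_change10_9 x → Spec_change10_9 x (change10_9 x)

-- ===== LEMMAS AND PROOFS =====

-- base-9 digits of n, least significant first, as chars
def pvDigs : Nat → List Char
  | 0 => []
  | n + 1 => Char.ofNat (48 + (n + 1) % 9) :: pvDigs ((n + 1) / 9)
decreasing_by exact Nat.div_lt_self (Nat.succ_pos n) (by omega)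

-- B's mathematical value
def pvBVal : Nat → Int
  | 0 => 0
  | n + 1 => pvBVal ((n + 1) / 9) * 10 + ((n + 1) % 9 : Nat)
decreasing_by exact Nat.div_lt_self (Nat.succ_pos n) (by omega)

theorem pvToChars_digit (d : Nat) (hd : d < 9) :
    PySem.Int.toChars (d : Int) = [Char.ofNat (48 + d)] := by
  interval_cases d <;> decide

theorem pvALoop_eq (f : Nat) : ∀ (now : Int) (num : List Char), 0 ≤ now → now.toNat < f →
    pvALoop f now num = num ++ pvDigs now.toNat := by
  induction f with
  | zero => intro now num _ h; omega
  | succ f ih =>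
    intro now num hnow hf
    by_cases h0 : now = 0
    · subst h0; simp [pvALoop, pvDigs]
    · have hpos : 0 < now := lt_of_le_of_ne hnow (Ne.symm h0)
      obtain ⟨n, rfl⟩ : ∃ n : Nat, now = ((n + 1 : Nat) : Int) := by
        refine ⟨now.toNat - 1, ?_⟩; omega
      have hmod : PySem.Int.mod ((n + 1 : Nat) : Int) 9 = (((n + 1) % 9 : Nat) : Int) := by
        exact_mod_cast PySem.Int.mod_natCast (n + 1) 9
      have hdiv : PySem.Int.floordiv ((n + 1 : Nat) : Int) 9 = (((n + 1) / 9 : Nat) : Int) := by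
        exact_mod_cast PySem.Int.floordiv_natCast (n + 1) 9
      have hlt : ((n + 1) / 9 : Nat) < f := by
        have h1 : ((n + 1 : Nat) : Int).toNat = n + 1 := by omega
        have := Nat.div_lt_self (Nat.succ_pos n) (show 1 < 9 by omega)
        omega
      rw [pvALoop, if_neg h0, hmod, hdiv,
        pvToChars_digit _ (Nat.mod_lt _ (by omega)),
        ih _ _ (by positivity) (by omega)]
      have h1 : ((n + 1 : Nat) : Int).toNat = n + 1 := by omega
      have h2 : (((n + 1) / 9 : Nat) : Int).toNat = (n + 1) / 9 := by omega
      rw [h1, h2, pvDigs]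
      simp

theorem pvBLoop_eq (f : Nat) : ∀ (x : Int), 0 ≤ x → x.toNat < f →
    pvBLoop f x = pvBVal x.toNat := by
  induction f with
  | zero => intro x _ h; omega
  | succ f ih =>
    intro x hx hf
    by_cases h0 : x = 0
    · subst h0; simp [pvBLoop, pvBVal]
    · obtain ⟨n, rfl⟩ : ∃ n : Nat, x = ((n + 1 : Nat) : Int) := by
        refine ⟨x.toNat - 1, ?_⟩; omega
      have hmod : PySem.Int.mod ((n + 1 : Nat) : Int) 9 = (((n + 1) % 9 : Nat) : Int) := by
        exact_mod_cast PySem.Int.mod_natCast (n + 1) 9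
      have hdiv : PySem.Int.floordiv ((n + 1 : Nat) : Int) 9 = (((n + 1) / 9 : Nat) : Int) := by
        exact_mod_cast PySem.Int.floordiv_natCast (n + 1) 9
      have h1 : ((n + 1 : Nat) : Int).toNat = n + 1 := by omega
      have h2 : (((n + 1) / 9 : Nat) : Int).toNat = (n + 1) / 9 := by omega
      have hlt : ((n + 1) / 9 : Nat) < f := by
        have := Nat.div_lt_self (Nat.succ_pos n) (show 1 < 9 by omega)
        omega
      rw [pvBLoop, if_neg h0, hmod, hdiv, ih _ (by positivity) (by omega), h1, h2, pvBVal]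

theorem pvDigitVal_char (d : Nat) (hd : d < 9) :
    pvDigitVal (Char.ofNat (48 + d)) = (d : Int) := by
  interval_cases d <;> decide

theorem pvParse_digs (n : Nat) : pvParseDigits (pvDigs n).reverse = pvBVal n := by
  induction n using Nat.strong_induction_on with
  | _ n ih =>
    match n with
    | 0 => simp [pvDigs, pvBVal, pvParseDigits]
    | n + 1 =>
      have hdivlt : (n + 1) / 9 < n + 1 := Nat.div_lt_self (Nat.succ_pos n) (by omega)
      rw [pvDigs, pvBVal, List.reverse_cons, pvParseDigits, List.foldl_append, ← ih _ hdivlt]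
      simp [pvParseDigits, pvDigitVal_char _ (Nat.mod_lt _ (show 0 < 9 by omega))]

theorem pvDigs_ne_nil (n : Nat) (h : n ≠ 0) : pvDigs n ≠ [] := by
  match n with
  | 0 => omega
  | n + 1 => rw [pvDigs]; simp

-- ===== VERDICT (by name: the statement is the Claim_ definition above) =====
theorem change10_9_spec : Claim_equal_change10_9 := by
  intro x _ hpre
  unfold Spec_change10_9 change10_9 change10_9_alt
  rw [pvALoop_eq _ _ _ hpre (by omega), pvBLoop_eq _ _ hpre (by omega)]
  by_cases h0 : x.toNat = 0
  · rw [h0]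
    simp [pvDigs, pvBVal, pvParseDigits, pvDigitVal]
  · simp only [List.nil_append, if_neg (pvDigs_ne_nil _ h0)]
    exact pvParse_digs _
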